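-- pv_equiv track=rewrite | github.com/kumarabhishek008/a1 | work.py | check
-- ===== SOURCE A (Python) =====
-- import math
--
-- def euler(val):
--     val = str(val)
--     a = 0;
--     for i in val:
--         a += math.factorial(int(i))
--     a = str(a)
--     b=0
--     for i in a:
--         b += int(i)
--     return b
--
-- def check(n,m):
--     Egi = 0
--     for i in range(1,n+1):
--         k=0
--         for j in range(1,m):
--             if i == euler(j):
--                 k = j
--                 break
--         sgi = 0
--         k = str(k)
--         for l in k:
--             sgi += int(l)
--         Egi += sgi
--
--     return Egi
-- ===== SOURCE B (Python) =====
-- import math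
--
-- def _digitsum(k):
--     return sum(int(d) for d in str(k))
--
-- def _euler(val):
--     return _digitsum(sum(math.factorial(int(d)) for d in str(val)))
--
-- def check(n, m):
--     if n < 1:
--         return 0
--     total = 0
--     found = set()
--     for j in range(1, m):
--         e = _euler(j)
--         if 1 <= e <= n and e not in found:
--             total += _digitsum(j)
--             found.add(e)
--             if len(found) == n:
--                 break
--     return total
-- ===== Notes on version B (the rewrite author's own statement) =====
-- stated objective: faster
-- what changed: Replaced the per-target linear search (for every i in 1..n scan j=1..m-1 for the first j with euler(j)=i) by a single pass over j that records the first j for each euler-value in 1..n with a seen-set; unmatched targets contribute digitsum(0)=0 in A, so skipping them is exact.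
import Mathlib
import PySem

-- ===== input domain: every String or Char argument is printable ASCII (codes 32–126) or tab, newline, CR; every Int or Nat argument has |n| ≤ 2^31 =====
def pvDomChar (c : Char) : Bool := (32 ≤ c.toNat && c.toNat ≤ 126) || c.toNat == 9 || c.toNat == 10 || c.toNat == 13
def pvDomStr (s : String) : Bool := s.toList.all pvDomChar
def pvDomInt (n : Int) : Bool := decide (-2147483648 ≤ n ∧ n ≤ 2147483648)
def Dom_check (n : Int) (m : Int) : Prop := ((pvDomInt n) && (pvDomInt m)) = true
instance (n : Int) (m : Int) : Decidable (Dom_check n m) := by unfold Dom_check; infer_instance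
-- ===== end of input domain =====

-- B replaces A's per-target scan (for each i in 1..n, find the first j<m with euler(j)=i) by ONE pass
-- over j=1..m-1 that adds digitsum(j) the first time each euler-value in 1..n appears (seen-set); faster.

-- ===== PORT A =====
-- int(c) for a single digit character (exact on '0'..'9', the only characters str() of the
-- nonnegative ints reached here produces)
def pvDigit (c : Char) : Int := ((c.toNat - 48 : Nat) : Int)
-- math.factorial(int(c)) for a digit character
def pvFact (c : Char) : Int := ((Nat.factorial (c.toNat - 48) : Nat) : Int)

def euler (val : Int) : Int :=
  let s := PySem.Int.toChars val
  let a := s.foldl (fun a c => a + pvFact c) 0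
  let as := PySem.Int.toChars a
  as.foldl (fun b c => b + pvDigit c) 0

-- the inner 'for j in range(1,m): if i == euler(j): k = j; break' loop (k starts at 0);
-- ported lazily over the loop counter, as Python's range is lazy and the break stops early
def findK (i : Int) (j : Int) (m : Int) : Int :=
  if j < m then
    (if i = euler j then j else findK i (j + 1) m)
  else 0
termination_by (m - j).toNat
decreasing_by omega

def check (n : Int) (m : Int) : Int :=
  (PySem.List.pyRange 1 (n+1) 1).foldl
    (fun Egi i =>
      let k := findK i 1 m
      let sgi := (PySem.Int.toChars k).foldl (fun b l => b + pvDigit l) 0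
      Egi + sgi) 0

-- ===== PORT B =====
def digitsumAlt (k : Int) : Int := ((PySem.Int.toChars k).map pvDigit).sum

def eulerAlt (v : Int) : Int :=
  digitsumAlt (((PySem.Int.toChars v).map pvFact).sum)

-- the 'for j in range(1, m): ... break' loop of B, ported lazily over the loop counter
-- (Python's range is lazy; the break once all n targets are found must stop the loop)
def loopB (n : Int) (m : Int) (j : Int) (st : Int × PySem.Set Int) : Int × PySem.Set Int :=
  if j < m then
    let e := eulerAlt j
    if (1 ≤ e ∧ e ≤ n) ∧ e ∉ st.2 then
      let st' := (st.1 + digitsumAlt j, PySem.Set.add st.2 e)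
      (if PySem.Set.len st'.2 = n then st' else loopB n m (j + 1) st')
    else loopB n m (j + 1) st
  else st
termination_by (m - j).toNat
decreasing_by all_goals omega

def check_alt (n : Int) (m : Int) : Int :=
  if n < 1 then 0 else (loopB n m 1 (0, PySem.Set.empty)).1

-- ===== PRECONDITION & SPEC =====
def Spec_check (n : Int) (m : Int) (out : Int) : Prop := out = check_alt n m
instance (n : Int) (m : Int) (out : Int) : Decidable (Spec_check n m out) := by unfold Spec_check; infer_instance

-- ===== CLAIM (what is proved, stated in full; the proofs are below) =====
def Claim_equal_check : Prop := ∀ (n : Int) (m : Int), Dom_check n m → Spec_check n m (check n m)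

-- ===== LEMMAS AND PROOFS =====

-- list form of the inner search loop (proof helper)
def findKL (i : Int) : List Int → Int
  | [] => 0
  | j :: rest => if i = euler j then j else findKL i rest

lemma findK_eq (i j m : Int) : findK i j m = findKL i (PySem.List.pyRange j m 1) := by
  rw [findK]
  by_cases h : j < m
  · rw [if_pos h, PySem.List.pyRange_one_cons h]
    simp only [findKL]
    by_cases hi : i = euler j
    · simp [hi]
    · rw [if_neg hi, if_neg hi, findK_eq i (j + 1) m]
  · rw [if_neg h, PySem.List.pyRange_one_eq_nil (by omega)]
    rfl
termination_by (m - j).toNat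
decreasing_by omega

lemma euler_eq (v : Int) : eulerAlt v = euler v := by
  simp [eulerAlt, euler, digitsumAlt, PySem.List.foldl_add]

lemma ds_zero : digitsumAlt 0 = 0 := by decide

lemma findKL_eq_zero_iff (i : Int) (L : List Int) (h : ∀ j ∈ L, j ≠ 0) :
    findKL i L = 0 ↔ ∀ j ∈ L, euler j ≠ i := by
  induction L with
  | nil => simp [findKL]
  | cons j rest ih =>
    simp only [findKL]
    by_cases hj : i = euler j
    · simp only [if_pos hj, List.mem_cons]
      constructor
      · exact fun hz => absurd hz (h j (by simp))
      · exact fun hh => absurd hj.symm (hh j (Or.inl rfl))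
    · rw [if_neg hj, ih (fun x hx => h x (by simp [hx]))]
      simp only [List.mem_cons]
      constructor
      · exact fun hh x hx => hx.elim (fun he => he ▸ fun hc => hj hc.symm) (hh x)
      · exact fun hh x hx => hh x (Or.inr hx)

lemma findKL_append (i : Int) (L M : List Int) (h : ∀ j ∈ L, j ≠ 0) :
    findKL i (L ++ M) = if findKL i L = 0 then findKL i M else findKL i L := by
  induction L with
  | nil => simp [findKL]
  | cons j rest ih =>
    by_cases hj : i = euler j
    · simp [findKL, hj, h j (by simp)]
    · simp only [List.cons_append, findKL, if_neg hj]
      exact ih (fun x hx => h x (by simp [hx]))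

lemma sum_map_ite_nodup (l : List Int) (e d : Int) (h : l.Nodup) :
    (l.map fun i => if i = e then d else 0).sum = if e ∈ l then d else 0 := by
  induction l with
  | nil => simp
  | cons a rest ih =>
    rcases List.nodup_cons.mp h with ⟨ha, hr⟩
    by_cases hae : a = e
    · subst hae; simp [ha, ih hr]
    · simp [hae, Ne.symm hae, ih hr]

-- the loop step without the break (proof helper)
def stepB (n : Int) (st : Int × PySem.Set Int) (j : Int) : Int × PySem.Set Int :=
  let e := eulerAlt j
  if (1 ≤ e ∧ e ≤ n) ∧ e ∉ st.2 then (st.1 + digitsumAlt j, PySem.Set.add st.2 e)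
  else st

-- the break-free fold state (proof helper)
def Bst (n m : Int) : Int × PySem.Set Int :=
  (PySem.List.pyRange 1 m 1).foldl (stepB n) (0, PySem.Set.empty)

-- once every target 1..n is already in the seen-set, the break-free loop is a no-op
lemma foldl_stall (n : Int) (L : List Int) (st : Int × PySem.Set Int)
    (hfull : ∀ e : Int, 1 ≤ e → e ≤ n → e ∈ st.2) :
    L.foldl (stepB n) st = st := by
  induction L with
  | nil => rfl
  | cons j rest ih =>
    have : stepB n st j = st := by
      simp only [stepB]
      rw [if_neg]
      rintro ⟨⟨h1, h2⟩, hnot⟩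
      exact hnot (hfull _ h1 h2)
    rw [List.foldl_cons, this, ih]

-- n distinct seen values, all in [1, n]: every target 1..n is seen (pigeonhole)
lemma full_of_len (n : Int) (s : PySem.Set Int) (hnd : s.Nodup)
    (hsub : ∀ e ∈ s, 1 ≤ e ∧ e ≤ n) (hlen : PySem.Set.len s = n) :
    ∀ e : Int, 1 ≤ e → e ≤ n → e ∈ s := by
  intro e he1 he2
  have hsubF : s.toFinset ⊆ Finset.Icc 1 n := by
    intro x hx
    rcases hsub x (List.mem_toFinset.mp hx) with ⟨h1, h2⟩
    exact Finset.mem_Icc.mpr ⟨h1, h2⟩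
  have hcard : s.toFinset.card = s.length := List.toFinset_card_of_nodup hnd
  have hIcc : (Finset.Icc (1 : Int) n).card = n.toNat := by
    rw [Int.card_Icc]; omega
  have hlen' : (s.length : Int) = n := by
    simpa [PySem.Set.len] using hlen
  have heq : s.toFinset = Finset.Icc 1 n := by
    apply Finset.eq_of_subset_of_card_le hsubF
    rw [hcard, hIcc]; omega
  have : e ∈ s.toFinset := heq ▸ Finset.mem_Icc.mpr ⟨he1, he2⟩
  exact List.mem_toFinset.mp this

-- the breaking loop computes the same running total as the break-free fold
lemma loopB_eq (n m : Int) : ∀ (j : Int) (st : Int × PySem.Set Int), st.2.Nodup →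
    (∀ e ∈ st.2, 1 ≤ e ∧ e ≤ n) →
    (loopB n m j st).1 = ((PySem.List.pyRange j m 1).foldl (stepB n) st).1 := by
  intro j st hnd hsub
  rw [loopB]
  by_cases h : j < m
  · rw [if_pos h, PySem.List.pyRange_one_cons h, List.foldl_cons]
    by_cases hc : (1 ≤ eulerAlt j ∧ eulerAlt j ≤ n) ∧ eulerAlt j ∉ st.2
    · have hstep : stepB n st j = (st.1 + digitsumAlt j, PySem.Set.add st.2 (eulerAlt j)) := by
        simp only [stepB]; rw [if_pos hc]
      have hnd' : (PySem.Set.add st.2 (eulerAlt j)).Nodup := PySem.Set.nodup_add st.2 (eulerAlt j) hnd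
      have hsub' : ∀ e ∈ PySem.Set.add st.2 (eulerAlt j), 1 ≤ e ∧ e ≤ n := by
        intro e he
        rw [PySem.Set.mem_add] at he
        rcases he with he | rfl
        · exact hsub e he
        · exact hc.1
      simp only [if_pos hc]
      by_cases hl : PySem.Set.len (PySem.Set.add st.2 (eulerAlt j)) = n
      · rw [if_pos hl, hstep]
        rw [foldl_stall n _ _ (full_of_len n _ hnd' hsub' hl)]
      · rw [if_neg hl, hstep]
        exact loopB_eq n m (j + 1) _ hnd' hsub'
    · have hstep : stepB n st j = st := by
        simp only [stepB]; rw [if_neg hc]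
      simp only [if_neg hc]
      rw [hstep]
      exact loopB_eq n m (j + 1) st hnd hsub
  · rw [if_neg h, PySem.List.pyRange_one_eq_nil (by omega), List.foldl_nil]
termination_by j => (m - j).toNat
decreasing_by all_goals omega

lemma check_alt_eq_Bst (n m : Int) (hn : ¬ n < 1) : check_alt n m = (Bst n m).1 := by
  rw [check_alt, if_neg hn, Bst]
  exact loopB_eq n m 1 (0, PySem.Set.empty) List.nodup_nil (by simp [PySem.Set.empty])

lemma check_eq_sum (n m : Int) :
    check n m =
      ((PySem.List.pyRange 1 (n+1) 1).map
        (fun i => digitsumAlt (findKL i (PySem.List.pyRange 1 m 1)))).sum := by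
  simp [check, PySem.List.foldl_add, digitsumAlt, findK_eq]

lemma main_inv (n : Int) (t : Nat) :
    check n (1 + (t : Int)) = (Bst n (1 + (t : Int))).1 ∧
    ∀ e : Int, e ∈ (Bst n (1 + (t : Int))).2 ↔
      1 ≤ e ∧ e ≤ n ∧ ∃ j ∈ PySem.List.pyRange 1 (1 + (t : Int)) 1, euler j = e := by
  induction t with
  | zero =>
    have hE : PySem.List.pyRange 1 1 1 = [] :=
      PySem.List.pyRange_one_eq_nil le_rfl
    constructor
    · rw [check_eq_sum]
      simp [Bst, hE, findKL, ds_zero, PySem.Set.empty]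
    · simp [Bst, hE, PySem.Set.empty]
  | succ t ih =>
    obtain ⟨ih1, ih2⟩ := ih
    set m : Int := 1 + (t : Int) with hmdef
    have hcast : 1 + ((t + 1 : Nat) : Int) = m + 1 := by push_cast; ring
    have hm1 : (1 : Int) ≤ m := by omega
    have hL : PySem.List.pyRange 1 (m + 1) 1 = PySem.List.pyRange 1 m 1 ++ [m] :=
      PySem.List.pyRange_one_succ_right hm1
    have hpos : ∀ j ∈ PySem.List.pyRange 1 m 1, j ≠ 0 := by
      intro j hj
      have := PySem.List.mem_pyRange_one.mp hj
      omega
    -- A-side step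
    have hpt : ∀ i : Int,
        digitsumAlt (findKL i (PySem.List.pyRange 1 m 1 ++ [m])) =
        digitsumAlt (findKL i (PySem.List.pyRange 1 m 1)) +
          (if i = euler m then
            (if findKL (euler m) (PySem.List.pyRange 1 m 1) = 0 then digitsumAlt m else 0)
           else 0) := by
      intro i
      rw [findKL_append i _ [m] hpos]
      by_cases hi : i = euler m
      · subst hi
        by_cases hz : findKL (euler m) (PySem.List.pyRange 1 m 1) = 0
        · simp [hz, findKL, ds_zero]
        · simp [hz]
      · by_cases hz : findKL i (PySem.List.pyRange 1 m 1) = 0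
        · simp [hz, findKL, hi, ds_zero]
        · simp [hz, hi]
    have hA : check n (m + 1) =
        check n m +
          (if (1 ≤ euler m ∧ euler m ≤ n) ∧
              findKL (euler m) (PySem.List.pyRange 1 m 1) = 0
           then digitsumAlt m else 0) := by
      rw [check_eq_sum, check_eq_sum, hL]
      simp only [hpt]
      rw [List.sum_map_add]
      rw [sum_map_ite_nodup _ _ _ (PySem.List.nodup_pyRange_one 1 (n+1))]
      have hmem : euler m ∈ PySem.List.pyRange 1 (n + 1) 1 ↔
          1 ≤ euler m ∧ euler m ≤ n := by
        rw [PySem.List.mem_pyRange_one]; omega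
      by_cases h1 : 1 ≤ euler m ∧ euler m ≤ n
      · simp [hmem.mpr h1, h1]
      · simp [h1]
    -- B-side step
    have hstep : Bst n (m + 1) =
        (if (1 ≤ euler m ∧ euler m ≤ n) ∧ euler m ∉ (Bst n m).2 then
          ((Bst n m).1 + digitsumAlt m, PySem.Set.add (Bst n m).2 (euler m))
         else Bst n m) := by
      simp only [Bst, stepB, hL, List.foldl_append, List.foldl_cons, List.foldl_nil, euler_eq]
    have hnotin : euler m ∉ (Bst n m).2 ↔
        ¬ (1 ≤ euler m ∧ euler m ≤ n ∧
            ∃ j ∈ PySem.List.pyRange 1 m 1, euler j = euler m) := by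
      rw [ih2 (euler m)]
    have hfk : findKL (euler m) (PySem.List.pyRange 1 m 1) = 0 ↔
        ∀ j ∈ PySem.List.pyRange 1 m 1, euler j ≠ euler m :=
      findKL_eq_zero_iff _ _ hpos
    rw [hcast]
    by_cases hc : (1 ≤ euler m ∧ euler m ≤ n) ∧ euler m ∉ (Bst n m).2
    · have hzz : findKL (euler m) (PySem.List.pyRange 1 m 1) = 0 := by
        rw [hfk]
        intro j hj hje
        exact (hnotin.mp hc.2) ⟨hc.1.1, hc.1.2, j, hj, hje⟩
      constructor
      · rw [hA, hstep, if_pos hc, ih1]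
        simp [hc.1, hzz]
      · intro e
        rw [hstep, if_pos hc]
        simp only [PySem.Set.mem_add, ih2 e, hL, List.mem_append, List.mem_singleton]
        constructor
        · rintro (⟨h1, h2, j, hj, hje⟩ | rfl)
          · exact ⟨h1, h2, j, Or.inl hj, hje⟩
          · exact ⟨hc.1.1, hc.1.2, m, Or.inr rfl, rfl⟩
        · rintro ⟨h1, h2, j, (hj | rfl), hje⟩
          · exact Or.inl ⟨h1, h2, j, hj, hje⟩
          · exact Or.inr hje.symm
    · constructor
      · rw [hA, hstep, if_neg hc, ih1]
        by_cases h1 : 1 ≤ euler m ∧ euler m ≤ n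
        · have hin : euler m ∈ (Bst n m).2 := by
            by_contra hno
            exact hc ⟨h1, hno⟩
          obtain ⟨_, _, j, hj, hje⟩ := (ih2 (euler m)).mp hin
          have : ¬ findKL (euler m) (PySem.List.pyRange 1 m 1) = 0 := by
            rw [hfk]; push Not; exact ⟨j, hj, hje⟩
          simp [this]
        · simp [h1]
      · intro e
        rw [hstep, if_neg hc]
        simp only [ih2 e, hL, List.mem_append, List.mem_singleton]
        constructor
        · rintro ⟨h1, h2, j, hj, hje⟩
          exact ⟨h1, h2, j, Or.inl hj, hje⟩
        · rintro ⟨h1, h2, j, (hj | rfl), hje⟩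
          · exact ⟨h1, h2, j, hj, hje⟩
          · -- e = euler m with 1 ≤ e ≤ n: the condition failed, so euler m ∈ found
            subst hje
            have hin : euler m ∈ (Bst n m).2 := by
              by_contra hno
              exact hc ⟨⟨h1, h2⟩, hno⟩
            exact (ih2 (euler m)).mp hin

-- ===== VERDICT (by name: the statement is the Claim_ definition above) =====
theorem check_spec : Claim_equal_check := by
  intro n m _
  show check n m = check_alt n m
  by_cases hn : n < 1
  · rw [check_eq_sum, check_alt, if_pos hn,
      PySem.List.pyRange_one_eq_nil (by omega : (n + 1 : Int) ≤ 1)]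
    simp
  · by_cases hm : m ≤ 1
    · have hE : PySem.List.pyRange 1 m 1 = [] := PySem.List.pyRange_one_eq_nil hm
      rw [check_eq_sum, check_alt_eq_Bst n m hn]
      simp [Bst, hE, findKL, ds_zero, PySem.Set.empty]
    · have hmt : m = 1 + (((m - 1).toNat : Nat) : Int) := by omega
      rw [check_alt_eq_Bst n m hn, hmt]
      exact (main_inv n (m - 1).toNat).1
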